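-- pv_equiv track=rewrite | github.com/lanzv/SongChordsRecognizer | ACR_Pipeline/ChordVoter.py | _beat_chord_harmony_estimation
-- ===== SOURCE A (Python) =====
-- def _beat_chord_harmony_estimation(one_beat_elements, count_encoded_sequence):
--     """
--     The function will take the length of same chord subsequence and will estimate how many beats could be that.
--     The number of beats coressponding to the chord duration is the number how many times the chord is added to
--     the final result list of chords .. chord_beats.
--
--     Parameters
--     ----------
--     one_beat_elements : int
--         how many sequence elements coressponds to one beat by the simple BPM estimation
--     count_encoded_sequence : tuple list
--         list of (chord, count) tuples that encoded the chord and its duration length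
--     Returns
--     -------
--     chord_beats : int list
--         sequence of chords mapped to each beat
--     beats : int list
--         beat points
--     """
--     chord_beats = []
--     beats = []
--     counts = 0
--     for (chord, count) in count_encoded_sequence:
--         for i in range(round(count/one_beat_elements)):
--             chord_beats.append(chord)
--             beats.append(counts + i * one_beat_elements)
--         counts = counts + count
--
--     return chord_beats, beats
-- ===== SOURCE B (Python) =====
-- def _nbeats(count, one_beat_elements):
--     return round(count / one_beat_elements)
--
--
-- def _beat_chord_harmony_estimation(one_beat_elements, count_encoded_sequence):
--     # Tabulate prefix offsets first, then expand each run independently.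
--     bases = [0]
--     for _, count in count_encoded_sequence:
--         bases.append(bases[-1] + count)
--     chord_beats = [chord
--                    for chord, count in count_encoded_sequence
--                    for _ in range(_nbeats(count, one_beat_elements))]
--     beats = [base + i * one_beat_elements
--              for ((_, count), base) in zip(count_encoded_sequence, bases)
--              for i in range(_nbeats(count, one_beat_elements))]
--     return chord_beats, beats
-- ===== Notes on version B (the rewrite author's own statement) =====
-- stated objective: alternative
-- what changed: Replaces A's single stateful pass (running offset accumulator updated while appending) by a tabulate-then-expand decomposition: a prefix-offset table is built first, then chord_beats and beats are produced by two independent comprehensions over the runs zipped with their precomputed bases.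
-- outside the precondition, e.g. on _beat_chord_harmony_estimation(0, [(1, 1)]): A raises ZeroDivisionError, B raises ZeroDivisionError
import Mathlib
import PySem

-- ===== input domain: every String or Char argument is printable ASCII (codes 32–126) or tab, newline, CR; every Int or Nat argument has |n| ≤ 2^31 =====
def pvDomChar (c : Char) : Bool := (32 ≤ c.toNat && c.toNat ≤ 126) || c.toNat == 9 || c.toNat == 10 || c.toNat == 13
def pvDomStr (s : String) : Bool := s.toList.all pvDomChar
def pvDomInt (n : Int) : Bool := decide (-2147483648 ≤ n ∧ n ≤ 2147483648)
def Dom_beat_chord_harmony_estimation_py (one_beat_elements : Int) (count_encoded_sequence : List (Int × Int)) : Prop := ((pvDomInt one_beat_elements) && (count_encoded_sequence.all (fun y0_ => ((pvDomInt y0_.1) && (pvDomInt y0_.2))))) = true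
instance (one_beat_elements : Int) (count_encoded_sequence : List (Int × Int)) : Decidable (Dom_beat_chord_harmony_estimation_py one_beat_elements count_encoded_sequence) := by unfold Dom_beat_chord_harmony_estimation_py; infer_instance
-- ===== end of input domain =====

-- B tabulates the prefix offsets first and then expands each run independently
-- with two comprehensions, instead of A's single stateful pass (objective: alternative).

-- round(a / b) of Python: exact banker's rounding of the rational a/b.  Exact on the
-- stated domain |a|,|b| ≤ 2^31: there the float quotient never crosses a half-integer
-- boundary relative to the exact rational, so round() agrees with exact rounding.
def pyRoundDiv (a b : Int) : Int :=
  let q := PySem.Int.floordiv a b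
  let r := PySem.Int.mod a b
  if (2 * r).natAbs < b.natAbs then q
  else if b.natAbs < (2 * r).natAbs then q + 1
  else if q % 2 = 0 then q else q + 1

-- ===== PORT A =====
-- one iteration of A's outer for-loop (the inner for-loop is the nested foldl)
def stepA (one_beat_elements : Int) (st : List Int × List Int × Int) (p : Int × Int) : List Int × List Int × Int :=
  let counts := st.2.2
  let inner := (PySem.List.pyRange 0 (pyRoundDiv p.2 one_beat_elements) 1).foldl
    (fun (st2 : List Int × List Int) i =>
      (st2.1 ++ [p.1], st2.2 ++ [counts + i * one_beat_elements]))
    (st.1, st.2.1)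
  (inner.1, inner.2, counts + p.2)

def beat_chord_harmony_estimation_py (one_beat_elements : Int) (count_encoded_sequence : List (Int × Int)) : List Int × List Int :=
  let st := count_encoded_sequence.foldl (stepA one_beat_elements) ([], [], 0)
  (st.1, st.2.1)

-- ===== PORT B =====
def beat_chord_harmony_estimation_py_alt (one_beat_elements : Int) (count_encoded_sequence : List (Int × Int)) : List Int × List Int :=
  let bases := count_encoded_sequence.foldl (fun bs p => bs ++ [bs.getLast! + p.2]) [0]
  let chord_beats := count_encoded_sequence.flatMap
    (fun p => (PySem.List.pyRange 0 (pyRoundDiv p.2 one_beat_elements) 1).map (fun _ => p.1))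
  let beats := (count_encoded_sequence.zip bases).flatMap
    (fun pb => (PySem.List.pyRange 0 (pyRoundDiv pb.1.2 one_beat_elements) 1).map
      (fun i => pb.2 + i * one_beat_elements))
  (chord_beats, beats)

-- ===== PRECONDITION & SPEC =====
-- Pre_ excludes one_beat_elements = 0, on which A raises ZeroDivisionError (B raises too).
def Pre_beat_chord_harmony_estimation_py (one_beat_elements : Int) (count_encoded_sequence : List (Int × Int)) : Prop := one_beat_elements ≠ 0
instance (one_beat_elements : Int) (count_encoded_sequence : List (Int × Int)) : Decidable (Pre_beat_chord_harmony_estimation_py one_beat_elements count_encoded_sequence) := by unfold Pre_beat_chord_harmony_estimation_py; infer_instance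
def pvWitness_beat_chord_harmony_estimation_py : Int × (List (Int × Int)) := (2, [(1, 4), (2, 3), (3, 5)])

def Spec_beat_chord_harmony_estimation_py (one_beat_elements : Int) (count_encoded_sequence : List (Int × Int)) (out : List Int × List Int) : Prop := out = beat_chord_harmony_estimation_py_alt one_beat_elements count_encoded_sequence
instance (one_beat_elements : Int) (count_encoded_sequence : List (Int × Int)) (out : List Int × List Int) : Decidable (Spec_beat_chord_harmony_estimation_py one_beat_elements count_encoded_sequence out) := by unfold Spec_beat_chord_harmony_estimation_py; infer_instance

-- ===== CLAIM (what is proved, stated in full; the proofs are below) =====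
def Claim_equal_beat_chord_harmony_estimation_py : Prop := ∀ (one_beat_elements : Int) (count_encoded_sequence : List (Int × Int)), Dom_beat_chord_harmony_estimation_py one_beat_elements count_encoded_sequence → Pre_beat_chord_harmony_estimation_py one_beat_elements count_encoded_sequence → Spec_beat_chord_harmony_estimation_py one_beat_elements count_encoded_sequence (beat_chord_harmony_estimation_py one_beat_elements count_encoded_sequence)

-- ===== LEMMAS AND PROOFS =====

-- canonical expansions both ports are proved equal to
def expC (obe : Int) : List (Int × Int) → List Int
  | [] => []
  | p :: t => (PySem.List.pyRange 0 (pyRoundDiv p.2 obe) 1).map (fun _ => p.1) ++ expC obe t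

def expB (obe c : Int) : List (Int × Int) → List Int
  | [] => []
  | p :: t => (PySem.List.pyRange 0 (pyRoundDiv p.2 obe) 1).map (fun i => c + i * obe) ++ expB obe (c + p.2) t

def basesList (c : Int) : List (Int × Int) → List Int
  | [] => [c]
  | p :: t => c :: basesList (c + p.2) t

lemma inner_foldl (ch c obe : Int) (l : List Int) :
    ∀ cb bs : List Int,
    l.foldl (fun (st2 : List Int × List Int) i => (st2.1 ++ [ch], st2.2 ++ [c + i * obe])) (cb, bs)
      = (cb ++ l.map (fun _ => ch), bs ++ l.map (fun i => c + i * obe)) := by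
  induction l with
  | nil => simp
  | cons x t ih => intro cb bs; simp [List.foldl, ih]

lemma a_foldl (obe : Int) (seq : List (Int × Int)) :
    ∀ cb bs : List Int, ∀ c : Int,
    seq.foldl (stepA obe) (cb, bs, c)
      = (cb ++ expC obe seq, bs ++ expB obe c seq, c + (seq.map Prod.snd).sum) := by
  induction seq with
  | nil => simp [expC, expB]
  | cons p t ih =>
    intro cb bs c
    rw [List.foldl_cons,
        show stepA obe (cb, bs, c) p
            = (cb ++ (PySem.List.pyRange 0 (pyRoundDiv p.2 obe) 1).map (fun _ => p.1),
               bs ++ (PySem.List.pyRange 0 (pyRoundDiv p.2 obe) 1).map (fun i => c + i * obe),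
               c + p.2) from by simp [stepA, inner_foldl],
        ih]
    simp [expC, expB, add_assoc]

lemma bases_foldl (seq : List (Int × Int)) :
    ∀ (pre : List Int) (c : Int),
    seq.foldl (fun bs p => bs ++ [bs.getLast! + p.2]) (pre ++ [c]) = pre ++ basesList c seq := by
  induction seq with
  | nil => simp [basesList]
  | cons p t ih =>
    intro pre c
    have hl : (pre ++ [c]).getLast! = c := by
      induction pre with
      | nil => rfl
      | cons x xs ihp =>
        cases xs with
        | nil => rfl
        | cons y ys => simpa using ihp
    simp only [List.foldl, hl]
    have : (pre ++ [c]) ++ [c + p.2] = (pre ++ [c]) ++ [c + p.2] := rfl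
    rw [show pre ++ [c] ++ [c + p.2] = (pre ++ [c]) ++ [c + p.2] from rfl, ih (pre ++ [c]) (c + p.2)]
    simp [basesList]

lemma zip_expand (obe : Int) (seq : List (Int × Int)) :
    ∀ c : Int,
    (seq.zip (basesList c seq)).flatMap
      (fun pb => (PySem.List.pyRange 0 (pyRoundDiv pb.1.2 obe) 1).map (fun i => pb.2 + i * obe))
      = expB obe c seq := by
  induction seq with
  | nil => intro c; rfl
  | cons p t ih => intro c; simp [basesList, expB, ih]

lemma chord_expand (obe : Int) (seq : List (Int × Int)) :
    seq.flatMap (fun p => (PySem.List.pyRange 0 (pyRoundDiv p.2 obe) 1).map (fun _ => p.1))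
      = expC obe seq := by
  induction seq with
  | nil => rfl
  | cons p t ih => simp only [List.flatMap_cons, expC]; rw [ih]

-- ===== VERDICT (by name: the statement is the Claim_ definition above) =====
theorem beat_chord_harmony_estimation_py_spec : Claim_equal_beat_chord_harmony_estimation_py := by
  intro obe seq _ _
  unfold Spec_beat_chord_harmony_estimation_py
  unfold beat_chord_harmony_estimation_py beat_chord_harmony_estimation_py_alt
  rw [a_foldl obe seq [] [] 0,
      show ([0] : List Int) = [] ++ [0] from rfl, bases_foldl seq [] 0,
      chord_expand]
  simp only [List.nil_append]
  rw [zip_expand]
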